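-- pv_equiv track=rewrite | github.com/Fundacion-CARTIF/ENPOWER | classes_database.py | calculate_monthly
-- ===== SOURCE A (Python) =====
-- def calculate_monthly(hourly_data):
--     # Define the number of hours per month in a non-leap year
--     hours_per_month = [744, 672, 744, 720, 744, 720, 744, 744, 720, 744, 720, 744]
--     monthly_data = []
--     start = 0
--     for hours in hours_per_month:
--         monthly_data.append(sum(hourly_data[start:start + hours]))
--         start += hours
--     return monthly_data
-- ===== SOURCE B (Python) =====
-- def calculate_monthly(hourly_data):
--     # Single streaming pass: running total, in-month counter, month index.
--     hours_per_month = [744, 672, 744, 720, 744, 720, 744, 744, 720, 744, 720, 744]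
--     monthly_data = []
--     total = 0
--     count = 0
--     month = 0
--     for v in hourly_data:
--         if month >= 12:
--             break
--         total += v
--         count += 1
--         if count == hours_per_month[month]:
--             monthly_data.append(total)
--             total = 0
--             count = 0
--             month += 1
--     if month < 12:
--         monthly_data.append(total)
--         monthly_data.extend([0] * (12 - month - 1))
--     return monthly_data
-- ===== Notes on version B (the rewrite author's own statement) =====
-- stated objective: alternative
-- what changed: Replaces A's twelve slice-and-sum passes driven by a start index with a single streaming pass over hourly_data that keeps a running total, an in-month counter and a month index, emitting each month's total when its hour count is reached and padding short inputs with the partial total and zeros.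
import Mathlib
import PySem

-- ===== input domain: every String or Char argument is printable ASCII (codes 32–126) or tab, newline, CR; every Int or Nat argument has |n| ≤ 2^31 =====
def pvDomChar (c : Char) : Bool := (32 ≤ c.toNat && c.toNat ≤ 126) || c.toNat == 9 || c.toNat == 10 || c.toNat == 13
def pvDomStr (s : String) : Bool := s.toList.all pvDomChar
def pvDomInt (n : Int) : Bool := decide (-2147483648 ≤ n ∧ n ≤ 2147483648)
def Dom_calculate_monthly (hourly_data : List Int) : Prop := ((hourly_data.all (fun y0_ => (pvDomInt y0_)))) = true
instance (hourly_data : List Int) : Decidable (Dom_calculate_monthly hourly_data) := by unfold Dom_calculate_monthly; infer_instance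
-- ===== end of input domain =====

-- B replaces A's per-month slicing (12 slices over the list) by one streaming pass with a
-- running total, in-month counter and month index; objective: alternative decomposition.

-- ===== PORT A =====
def calculate_monthly (hourly_data : List Int) : List Int :=
  let hours_per_month : List Int := [744, 672, 744, 720, 744, 720, 744, 744, 720, 744, 720, 744]
  let st := hours_per_month.foldl
    (fun (st : List Int × Int) hours =>
      (st.1 ++ [(PySem.List.slice hourly_data (some st.2) (some (st.2 + hours))).foldl (· + ·) 0],
       st.2 + hours))
    ([], 0)
  st.1

-- ===== PORT B =====
-- the for-loop of Source B over hourly_data, state (monthly_data, total, count, month); the early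
-- 'break' is the month ≥ 12 return
def pvBLoop (hpm : List Int) : List Int → List Int → Int → Int → Int → List Int × Int × Int
  | [], acc, total, _count, month => (acc, total, month)
  | v :: rest, acc, total, count, month =>
    if month ≥ 12 then (acc, total, month)
    else
      let total := total + v
      let count := count + 1
      if some count = PySem.List.pyGet? hpm month then
        pvBLoop hpm rest (acc ++ [total]) 0 0 (month + 1)
      else
        pvBLoop hpm rest acc total count month

def calculate_monthly_alt (hourly_data : List Int) : List Int :=
  let hours_per_month : List Int := [744, 672, 744, 720, 744, 720, 744, 744, 720, 744, 720, 744]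
  let st := pvBLoop hours_per_month hourly_data [] 0 0 0
  if st.2.2 < 12 then st.1 ++ [st.2.1] ++ List.replicate (12 - st.2.2 - 1).toNat 0
  else st.1

-- ===== PRECONDITION & SPEC =====
def Spec_calculate_monthly (hourly_data : List Int) (out : List Int) : Prop := out = calculate_monthly_alt hourly_data
instance (hourly_data : List Int) (out : List Int) : Decidable (Spec_calculate_monthly hourly_data out) := by unfold Spec_calculate_monthly; infer_instance

-- ===== CLAIM (what is proved, stated in full; the proofs are below) =====
def Claim_equal_calculate_monthly : Prop := ∀ (hourly_data : List Int), Dom_calculate_monthly hourly_data → Spec_calculate_monthly hourly_data (calculate_monthly hourly_data)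

-- ===== LEMMAS AND PROOFS =====

-- canonical value: sum of the chunk of each month, consuming the list by take/drop
def pvChunks : List Int → List Int → List Int
  | [], _ => []
  | h :: hs, xs => (xs.take h.toNat).foldl (· + ·) 0 :: pvChunks hs (xs.drop h.toNat)

def pvHpm : List Int := [744, 672, 744, 720, 744, 720, 744, 744, 720, 744, 720, 744]

def pvFinish (st : List Int × Int × Int) : List Int :=
  if st.2.2 < 12 then st.1 ++ [st.2.1] ++ List.replicate (12 - st.2.2 - 1).toNat 0 else st.1

theorem pvChunks_nil (hs : List Int) : pvChunks hs [] = List.replicate hs.length 0 := by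
  induction hs with
  | nil => rfl
  | cons h hs ih => simp [pvChunks, ih, List.replicate_succ]

-- A-side: the slicing fold computes pvChunks
theorem pvA_fold (xs : List Int) (hs : List Int) (hnn : ∀ a ∈ hs, 0 ≤ a) :
    ∀ (acc : List Int) (start : Nat),
      (hs.foldl
        (fun (st : List Int × Int) hours =>
          (st.1 ++ [(PySem.List.slice xs (some st.2) (some (st.2 + hours))).foldl (· + ·) 0],
           st.2 + hours))
        (acc, (start : Int))).1 = acc ++ pvChunks hs (xs.drop start) := by
  induction hs with
  | nil => intro acc start; simp [pvChunks]
  | cons h hs ih =>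
    intro acc start
    have hpos : 0 ≤ h := hnn h (by simp)
    have hcast : ((start : Int) + h) = ((start + h.toNat : Nat) : Int) := by omega
    have hslice : PySem.List.slice xs (some (start : Int)) (some ((start : Int) + h)) =
        (xs.drop start).take h.toNat := by
      rw [hcast, PySem.List.slice_natCast]
      congr 1
      omega
    simp only [List.foldl_cons]
    rw [hslice, hcast, ih (fun a ha => hnn a (by simp [ha]))]
    simp only [pvChunks, List.drop_drop]
    rw [Nat.add_comm]
    simp

theorem pvA_eq (xs : List Int) : calculate_monthly xs = pvChunks pvHpm xs := by
  have := pvA_fold xs pvHpm (by decide) [] 0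
  simpa [calculate_monthly, pvHpm] using this

theorem pvBLoop_done (hpm : List Int) (xs acc : List Int) (t c : Int) (m : Int) (hm : 12 ≤ m) :
    pvBLoop hpm xs acc t c m = (acc, t, m) := by
  cases xs with
  | nil => rfl
  | cons v rest => simp [pvBLoop, hm]

theorem pvHpm_pos : ∀ a ∈ pvHpm, 0 < a := by decide

-- B-side main invariant: running the streaming loop from the start of month m (with c elements
-- already consumed into total t) and finishing produces the remaining chunk sums
theorem pvB_run (xs : List Int) :
    ∀ (m : Nat) (h : Int) (rs : List Int) (t c : Int) (acc : List Int),
      pvHpm.drop m = h :: rs → 0 ≤ c → c < h →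
      pvFinish (pvBLoop pvHpm xs acc t c (m : Int))
      = acc ++ ((xs.take (h - c).toNat).foldl (· + ·) t :: pvChunks rs (xs.drop (h - c).toNat)) := by
  induction xs with
  | nil =>
    intro m h rs t c acc hdrop hc hch
    have hlen : 12 - m = rs.length + 1 := by
      have := congrArg List.length hdrop
      simp [pvHpm] at this
      omega
    have hm : m < 12 := by omega
    simp only [pvBLoop, pvFinish]
    rw [if_pos (by exact_mod_cast hm)]
    have : ((12 : Int) - (m : Int) - 1).toNat = rs.length := by omega
    simp [this, pvChunks_nil]
  | cons v rest ih =>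
    intro m h rs t c acc hdrop hc hch
    have hlen : 12 - m = rs.length + 1 := by
      have := congrArg List.length hdrop
      simp [pvHpm] at this
      omega
    have hm : m < 12 := by omega
    have hget : PySem.List.pyGet? pvHpm ((m : Nat) : Int) = some h := by
      rw [PySem.List.pyGet?_natCast, ← List.head?_drop, hdrop]
      rfl
    have hguard : ¬ ((m : Int) ≥ 12) := by exact_mod_cast Nat.not_le.mpr hm
    simp only [pvBLoop, if_neg hguard, hget]
    by_cases hcase : c + 1 = h
    · rw [if_pos (by rw [hcase])]
      have hmc : (m : Int) + 1 = ((m + 1 : Nat) : Int) := by push_cast; ring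
      have htk : (h - c).toNat = 1 := by omega
      rw [hmc]
      cases rs with
      | nil =>
        have hm11 : m + 1 = 12 := by simp only [List.length_nil] at hlen; omega
        rw [hm11]
        rw [pvBLoop_done pvHpm rest (acc ++ [t + v]) 0 0 ((12 : Nat) : Int) (by exact_mod_cast le_rfl)]
        simp [pvFinish, htk, pvChunks]
      | cons h' rs' =>
        have hdrop' : pvHpm.drop (m + 1) = h' :: rs' := by
          rw [← List.tail_drop, hdrop]
          rfl
        have hpos' : 0 < h' := pvHpm_pos h' (by
          have : h' ∈ pvHpm.drop (m + 1) := by rw [hdrop']; simp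
          exact List.mem_of_mem_drop this)
        rw [ih (m + 1) h' rs' 0 0 (acc ++ [t + v]) hdrop' le_rfl hpos']
        simp [htk, pvChunks]
    · rw [if_neg (by simpa using fun hh => hcase hh)]
      have hch' : c + 1 < h := by omega
      rw [ih m h rs (t + v) (c + 1) acc hdrop (by omega) hch']
      have htk : (h - c).toNat = (h - (c + 1)).toNat + 1 := by omega
      simp [htk]

theorem pvB_eq (xs : List Int) : calculate_monthly_alt xs = pvChunks pvHpm xs := by
  have h := pvB_run xs 0 744 [672, 744, 720, 744, 720, 744, 744, 720, 744, 720, 744] 0 0 []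
    (by rfl) le_rfl (by norm_num)
  simp only [Nat.cast_zero] at h
  unfold calculate_monthly_alt pvFinish at *
  simp only [pvHpm] at h
  rw [h]
  rfl

-- ===== VERDICT (by name: the statement is the Claim_ definition above) =====
theorem calculate_monthly_spec : Claim_equal_calculate_monthly := by
  intro xs _
  unfold Spec_calculate_monthly
  rw [pvA_eq, pvB_eq]
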